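-- pv_equiv track=rewrite | github.com/miliar/Code_Jam_Webscraper | solutions_python/solutions_year16_round0_nr2/3322.py | findPancakeFlips
-- ===== SOURCE A (Python) =====
-- def findPancakeFlips(curr, n):
--     if len(n) == 0:
--         if curr == "-":
--             return 1
--         else:
--             return 0
--     else:
--         if curr != n[0]:
--             return 1 + findPancakeFlips(n[0], n[1:])
--         else:
--             return findPancakeFlips(n[0], n[1:])
-- ===== SOURCE B (Python) =====
-- def findPancakeFlips(curr, n):
--     count = 0
--     prev = curr
--     for ch in n:
--         if prev != ch:
--             count += 1
--         prev = ch
--     if prev == "-":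
--         count += 1
--     return count
-- ===== Notes on version B (the rewrite author's own statement) =====
-- stated objective: faster
-- what changed: Replaced A's recursion with repeated string slicing n[1:] by a single iterative pass over n's characters with a running previous-character accumulator.
import Mathlib
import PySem

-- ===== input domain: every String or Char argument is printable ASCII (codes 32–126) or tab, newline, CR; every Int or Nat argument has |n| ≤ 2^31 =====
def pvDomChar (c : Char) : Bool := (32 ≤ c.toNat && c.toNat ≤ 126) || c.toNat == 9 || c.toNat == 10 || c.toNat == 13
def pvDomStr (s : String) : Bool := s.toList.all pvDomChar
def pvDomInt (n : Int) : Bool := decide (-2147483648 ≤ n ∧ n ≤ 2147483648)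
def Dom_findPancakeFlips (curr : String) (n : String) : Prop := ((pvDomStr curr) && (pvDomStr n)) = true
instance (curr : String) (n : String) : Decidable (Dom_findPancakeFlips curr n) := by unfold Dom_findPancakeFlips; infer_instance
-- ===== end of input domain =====

-- B replaces A's O(n^2) recursion-with-slicing by one linear left-to-right pass (faster).
-- ===== PORT A =====
-- A recurses on n: base case checks curr == "-"; otherwise compares curr with the
-- one-character string n[0] and recurses on n[1:].
def findPancakeFlipsGoA (curr : String) : List Char → Int
  | [] => if curr = "-" then 1 else 0
  | c :: rest =>
    if curr ≠ String.ofList [c] then 1 + findPancakeFlipsGoA (String.ofList [c]) rest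
    else findPancakeFlipsGoA (String.ofList [c]) rest

def findPancakeFlips (curr : String) (n : String) : Int :=
  findPancakeFlipsGoA curr n.toList

-- ===== PORT B =====
-- B: one pass, counting transitions with a running previous-character string.
def findPancakeFlips_alt (curr : String) (n : String) : Int :=
  let st := n.toList.foldl
    (fun (st : Int × String) c =>
      (if st.2 ≠ String.ofList [c] then st.1 + 1 else st.1, String.ofList [c]))
    (0, curr)
  if st.2 = "-" then st.1 + 1 else st.1

-- ===== PRECONDITION & SPEC =====
def Spec_findPancakeFlips (curr : String) (n : String) (out : Int) : Prop := out = findPancakeFlips_alt curr n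
instance (curr : String) (n : String) (out : Int) : Decidable (Spec_findPancakeFlips curr n out) := by unfold Spec_findPancakeFlips; infer_instance

-- ===== CLAIM (what is proved, stated in full; the proofs are below) =====
def Claim_equal_findPancakeFlips : Prop := ∀ (curr : String) (n : String), Dom_findPancakeFlips curr n → Spec_findPancakeFlips curr n (findPancakeFlips curr n)

-- ===== LEMMAS AND PROOFS =====

-- ===== VERDICT (by name: the statement is the Claim_ definition above) =====
-- Loop invariant: the fold starting from accumulator `acc` computes `acc + goA curr l`.
theorem findPancakeFlips_fold_eq (l : List Char) : ∀ (curr : String) (acc : Int),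
    (let st := l.foldl
        (fun (st : Int × String) c =>
          (if st.2 ≠ String.ofList [c] then st.1 + 1 else st.1, String.ofList [c]))
        (acc, curr)
      if st.2 = "-" then st.1 + 1 else st.1) = acc + findPancakeFlipsGoA curr l := by
  induction l with
  | nil => intro curr acc; simp [findPancakeFlipsGoA]; split <;> omega
  | cons c rest ih =>
    intro curr acc
    simp only [List.foldl_cons]
    by_cases h : curr = String.ofList [c]
    · rw [show (if curr ≠ String.ofList [c] then acc + 1 else acc) = acc from if_neg (by simp [h])]
      rw [ih]
      simp [findPancakeFlipsGoA, h]
    · rw [show (if curr ≠ String.ofList [c] then acc + 1 else acc) = acc + 1 from if_pos h]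
      rw [ih]
      simp only [findPancakeFlipsGoA, if_pos h]
      omega

theorem findPancakeFlips_spec : Claim_equal_findPancakeFlips := by
  intro curr n _
  unfold Spec_findPancakeFlips findPancakeFlips findPancakeFlips_alt
  rw [findPancakeFlips_fold_eq]
  omega
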